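-- pv_equiv track=rewrite | github.com/abduvert/blind75-leetcode | sum78.py | sum78
-- ===== SOURCE A (Python) =====
-- def sum78(nums):
--   summ = 0
--   inSection = False
--   for i in nums:
--     if i==7:
--         inSection = True
--     elif i==8 and inSection:
--         inSection = False
--     elif not inSection:
--         summ += i
--   return summ
-- ===== SOURCE B (Python) =====
-- def sum78(nums):
--     s = 0
--     i = 0
--     n = len(nums)
--     while i < n:
--         if nums[i] == 7:
--             i += 1
--             while i < n and nums[i] != 8:
--                 i += 1
--             i += 1  # skip the closing 8 (harmless past the end)
--         else:
--             s += nums[i]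
--             i += 1
--     return s
-- ===== Notes on version B (the rewrite author's own statement) =====
-- stated objective: alternative
-- what changed: Replaces the boolean inSection flag scan by an index-based while loop that, on seeing a 7, consumes the whole 7..8 section with an inner loop and jumps past the closing 8, so no per-element state flag is carried.
import Mathlib
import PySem

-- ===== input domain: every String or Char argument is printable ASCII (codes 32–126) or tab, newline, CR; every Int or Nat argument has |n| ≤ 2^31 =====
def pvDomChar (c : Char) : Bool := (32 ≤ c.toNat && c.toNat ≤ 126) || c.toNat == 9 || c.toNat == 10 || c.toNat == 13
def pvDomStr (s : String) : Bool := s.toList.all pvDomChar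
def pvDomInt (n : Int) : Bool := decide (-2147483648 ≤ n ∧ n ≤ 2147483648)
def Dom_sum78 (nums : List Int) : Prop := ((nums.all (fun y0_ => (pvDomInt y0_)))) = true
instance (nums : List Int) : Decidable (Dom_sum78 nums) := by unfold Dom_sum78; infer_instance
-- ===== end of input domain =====

-- B replaces A's boolean inSection flag by an index walk that consumes a whole
-- 7..8 section in an inner loop (objective: alternative decomposition, same cost).

-- ===== PORT A =====
-- A: one pass carrying (summ, inSection); each branch in A's order.
def sum78 (nums : List Int) : Int :=
  (nums.foldl
    (fun (st : Int × Bool) (i : Int) =>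
      if i = 7 then (st.1, true)
      else if i = 8 ∧ st.2 = true then (st.1, false)
      else if st.2 = false then (st.1 + i, st.2)
      else st)
    (0, false)).1

-- ===== PORT B =====
-- inner 'while i < n and nums[i] != 8: i += 1' followed by 'i += 1':
-- drop elements up to and including the first 8 (everything if no 8).
def skip78 : List Int → List Int
  | [] => []
  | x :: rest => if x = 8 then rest else skip78 rest

theorem skip78_length_le (l : List Int) : (skip78 l).length ≤ l.length := by
  induction l with
  | nil => simp [skip78]
  | cons x rest ih =>
    simp only [skip78]
    split
    · simp
    · exact Nat.le_succ_of_le ih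

-- outer 'while i < n' as recursion on the remaining suffix, accumulator s.
def sum78AltGo : List Int → Int → Int
  | [], s => s
  | x :: rest, s =>
    if x = 7 then sum78AltGo (skip78 rest) s
    else sum78AltGo rest (s + x)
  termination_by l _ => l.length
  decreasing_by
    · exact Nat.lt_succ_of_le (skip78_length_le rest)
    · exact Nat.lt_succ_self _

def sum78_alt (nums : List Int) : Int := sum78AltGo nums 0

-- ===== PRECONDITION & SPEC =====
def Spec_sum78 (nums : List Int) (out : Int) : Prop := out = sum78_alt nums
instance (nums : List Int) (out : Int) : Decidable (Spec_sum78 nums out) := by unfold Spec_sum78; infer_instance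

-- ===== CLAIM (what is proved, stated in full; the proofs are below) =====
def Claim_equal_sum78 : Prop := ∀ (nums : List Int), Dom_sum78 nums → Spec_sum78 nums (sum78 nums)

-- ===== LEMMAS AND PROOFS =====

-- A's step function, named for the proofs.
def aStep (st : Int × Bool) (i : Int) : Int × Bool :=
  if i = 7 then (st.1, true)
  else if i = 8 ∧ st.2 = true then (st.1, false)
  else if st.2 = false then (st.1 + i, st.2)
  else st

theorem sum78_eq_foldl (nums : List Int) :
    sum78 nums = (nums.foldl aStep (0, false)).1 := rfl

-- In-section: A ignores everything (7 keeps the flag, others are skipped)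
-- until the first 8 clears the flag — i.e. the flag-true fold over l equals
-- the flag-false fold over skip78 l.
theorem foldl_true_skip (l : List Int) (s : Int) :
    (l.foldl aStep (s, true)).1 = ((skip78 l).foldl aStep (s, false)).1 := by
  induction l generalizing s with
  | nil => simp [skip78]
  | cons x rest ih =>
    by_cases h7 : x = 7
    · simp [skip78, aStep, h7, ih]
    · by_cases h8 : x = 8
      · simp [skip78, aStep, h8]
      · simp [skip78, aStep, h7, h8, ih]

-- Out-of-section fold agrees with B's recursion (strong induction on length,
-- since a 7 jumps to the shorter suffix skip78 rest).
theorem foldl_false_eq_go (n : Nat) :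
    ∀ (l : List Int) (s : Int), l.length ≤ n →
      (l.foldl aStep (s, false)).1 = sum78AltGo l s := by
  induction n with
  | zero =>
    intro l s h
    have : l = [] := List.eq_nil_of_length_eq_zero (Nat.le_zero.mp h)
    subst this; simp [sum78AltGo]
  | succ n ih =>
    intro l s h
    cases l with
    | nil => simp [sum78AltGo]
    | cons x rest =>
      simp only [List.length_cons, Nat.succ_le_succ_iff] at h
      by_cases h7 : x = 7
      · have hlen : (skip78 rest).length ≤ n :=
          le_trans (skip78_length_le rest) h
        simp only [sum78AltGo, h7, List.foldl_cons]
        rw [show aStep (s, false) 7 = (s, true) by simp [aStep]]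
        rw [foldl_true_skip]
        exact ih _ _ hlen
      · by_cases h8 : x = 8
        · simp only [sum78AltGo, h8, List.foldl_cons]
          rw [show aStep (s, false) 8 = (s + 8, false) by simp [aStep]]
          simp only [if_neg (by norm_num : (8:Int) ≠ 7)]
          exact ih _ _ h
        · simp only [sum78AltGo, if_neg h7, List.foldl_cons]
          rw [show aStep (s, false) x = (s + x, false) by
            simp [aStep, h7, h8]]
          exact ih _ _ h

-- ===== VERDICT (by name: the statement is the Claim_ definition above) =====
theorem sum78_spec : Claim_equal_sum78 := by
  intro nums _
  unfold Spec_sum78 sum78_alt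
  rw [sum78_eq_foldl]
  exact foldl_false_eq_go nums.length nums 0 (le_refl _)
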